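-- pv_equiv track=rewrite | github.com/normrubin/normrubin.github.io | fix_meta.py | fix_mermaid
-- ===== SOURCE A (Python) =====
-- def fix_mermaid(lines):
--     i = 0
--     while (i < len(lines)):
--         if lines[i] == '```{mermaid}':
--             if i + 1 == len(lines) or lines[i + 1].strip() != '%%{init: {"flowchart": {"htmlLabels": false}} }%%':
--                     lines.insert(i + 1, '%%{init: {"flowchart": {"htmlLabels": false}} }%%\n')
--                     i += 1
--         i +=1
--     return lines
-- ===== SOURCE B (Python) =====
-- def fix_mermaid(lines):
--     init = '%%{init: {"flowchart": {"htmlLabels": false}} }%%'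
--     targets = [i for i in range(len(lines))
--                if lines[i] == '```{mermaid}'
--                and (i + 1 == len(lines) or lines[i + 1].strip() != init)]
--     for i in reversed(targets):
--         lines.insert(i + 1, init + '\n')
--     return lines
-- ===== Notes on version B (the rewrite author's own statement) =====
-- stated objective: alternative
-- what changed: B replaces A's single mutating while-loop with manual index skipping by two decision-independent passes: first collect all fence indices needing an init line on the unmodified list, then insert them back-to-front so no index bookkeeping is needed; lines is still mutated in place.
import Mathlib
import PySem

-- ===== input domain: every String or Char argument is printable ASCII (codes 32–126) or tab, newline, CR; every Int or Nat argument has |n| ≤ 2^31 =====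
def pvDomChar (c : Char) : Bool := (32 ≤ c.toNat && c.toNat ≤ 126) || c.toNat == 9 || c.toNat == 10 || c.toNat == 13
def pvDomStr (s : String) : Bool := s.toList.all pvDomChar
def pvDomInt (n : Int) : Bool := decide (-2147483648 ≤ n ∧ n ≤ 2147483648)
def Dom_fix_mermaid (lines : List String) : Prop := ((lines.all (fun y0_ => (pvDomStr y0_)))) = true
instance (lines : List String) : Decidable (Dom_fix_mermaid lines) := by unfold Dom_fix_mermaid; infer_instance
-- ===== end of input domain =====

-- B collects the fence indices in one pass over the unmodified list and then inserts the init
-- line back-to-front (two decision-independent passes), instead of A's single mutating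
-- while-loop with index skipping; in Python both mutate `lines` in place ('alternative', not faster).

-- ===== PORT A =====
def fix_mermaid_loop (lines : List String) (i : Nat) : List String :=
  if h : i < lines.length then
    if lines[i] = "```{mermaid}" then
      if i + 1 = lines.length ∨
          PySem.Str.strip (lines.getD (i + 1) "") ≠ "%%{init: {\"flowchart\": {\"htmlLabels\": false}} }%%" then
        fix_mermaid_loop
          (PySem.List.insert lines ((i : Int) + 1) "%%{init: {\"flowchart\": {\"htmlLabels\": false}} }%%\n")
          (i + 2)
      else
        fix_mermaid_loop lines (i + 1)
    else
      fix_mermaid_loop lines (i + 1)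
  else
    lines
termination_by lines.length - i
decreasing_by
  · simp [PySem.List.length_insert]; omega
  · omega
  · omega

def fix_mermaid (lines : List String) : List String := fix_mermaid_loop lines 0

-- ===== PORT B =====
def fix_mermaid_alt (lines : List String) : List String :=
  let targets := (List.range lines.length).filter (fun i =>
    decide (lines.getD i "" = "```{mermaid}" ∧
      (i + 1 = lines.length ∨
        PySem.Str.strip (lines.getD (i + 1) "") ≠ "%%{init: {\"flowchart\": {\"htmlLabels\": false}} }%%")))
  targets.reverse.foldl
    (fun acc (i : Nat) =>
      PySem.List.insert acc ((i : Int) + 1) "%%{init: {\"flowchart\": {\"htmlLabels\": false}} }%%\n")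
    lines

-- ===== PRECONDITION & SPEC =====
def Spec_fix_mermaid (lines : List String) (out : List String) : Prop := out = fix_mermaid_alt lines
instance (lines : List String) (out : List String) : Decidable (Spec_fix_mermaid lines out) := by unfold Spec_fix_mermaid; infer_instance

-- ===== CLAIM (what is proved, stated in full; the proofs are below) =====
def Claim_equal_fix_mermaid : Prop := ∀ (lines : List String), Dom_fix_mermaid lines → Spec_fix_mermaid lines (fix_mermaid lines)

-- ===== LEMMAS AND PROOFS =====

-- reference function both ports are proved equal to
def gSpec : List String → List String
  | [] => []
  | a :: rest =>
    if a = "```{mermaid}" ∧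
        (rest = [] ∨
          PySem.Str.strip (rest.headD "") ≠ "%%{init: {\"flowchart\": {\"htmlLabels\": false}} }%%") then
      a :: "%%{init: {\"flowchart\": {\"htmlLabels\": false}} }%%\n" :: gSpec rest
    else
      a :: gSpec rest

lemma headD_drop (l : List String) (i : Nat) : (l.drop i).headD "" = l.getD i "" := by
  simp [List.head?_drop, List.getD_eq_getElem?_getD]

lemma loop_eq (lines : List String) (i : Nat) (hi : i ≤ lines.length) :
    fix_mermaid_loop lines i = lines.take i ++ gSpec (lines.drop i) := by
  induction lines, i using fix_mermaid_loop.induct with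
  | case1 lines i h hfence hcond ih =>
    rw [fix_mermaid_loop]
    simp only [h, dif_pos, hfence, if_pos, hcond]
    have h1 : i + 1 ≤ lines.length := h
    have h2 : i + 2 ≤ (PySem.List.insert lines ((i : Int) + 1)
        "%%{init: {\"flowchart\": {\"htmlLabels\": false}} }%%\n").length := by
      rw [PySem.List.length_insert]; omega
    rw [ih h2]
    have hins : PySem.List.insert lines ((i : Int) + 1)
        "%%{init: {\"flowchart\": {\"htmlLabels\": false}} }%%\n"
        = lines.take (i+1) ++ "%%{init: {\"flowchart\": {\"htmlLabels\": false}} }%%\n" :: lines.drop (i+1) := by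
      have := PySem.List.insert_natCast lines (i+1)
        "%%{init: {\"flowchart\": {\"htmlLabels\": false}} }%%\n" h1
      push_cast at this ⊢
      exact this
    rw [hins]
    have hlen : (lines.take (i+1)).length = i + 1 := by
      simp [List.length_take]; omega
    have htake : (lines.take (i+1) ++ "%%{init: {\"flowchart\": {\"htmlLabels\": false}} }%%\n" :: lines.drop (i+1)).take (i+2)
        = lines.take (i+1) ++ ["%%{init: {\"flowchart\": {\"htmlLabels\": false}} }%%\n"] := by
      rw [List.take_append, hlen]
      rw [List.take_of_length_le (by omega), show i + 2 - (i+1) = 1 by omega]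
      simp
    have hdrop : (lines.take (i+1) ++ "%%{init: {\"flowchart\": {\"htmlLabels\": false}} }%%\n" :: lines.drop (i+1)).drop (i+2)
        = lines.drop (i+1) := by
      rw [List.drop_append, hlen]
      rw [List.drop_of_length_le (by omega), show i + 2 - (i+1) = 1 by omega]
      simp
    rw [htake, hdrop]
    have hd : lines.drop i = lines[i] :: lines.drop (i+1) := List.drop_eq_getElem_cons h
    rw [hd, gSpec]
    have hc : lines[i] = "```{mermaid}" ∧
        (lines.drop (i+1) = [] ∨
          PySem.Str.strip ((lines.drop (i+1)).headD "") ≠ "%%{init: {\"flowchart\": {\"htmlLabels\": false}} }%%") := by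
      refine ⟨hfence, ?_⟩
      rcases hcond with hlen' | hne
      · left; rw [List.drop_eq_nil_iff]; omega
      · right; rw [headD_drop]; exact hne
    rw [if_pos hc, List.take_succ_eq_append_getElem h]
    simp only [List.append_assoc, List.singleton_append, List.cons_append, List.nil_append, if_false]
    rfl
  | case2 lines i h hfence hcond ih =>
    rw [fix_mermaid_loop]
    simp only [h, dif_pos, hfence, if_pos, hcond, if_neg]
    rw [ih (by omega)]
    have hd : lines.drop i = lines[i] :: lines.drop (i+1) := List.drop_eq_getElem_cons h
    rw [hd, gSpec]
    rw [not_or, not_ne_iff] at hcond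
    have hc : ¬ (lines[i] = "```{mermaid}" ∧
        (lines.drop (i+1) = [] ∨
          PySem.Str.strip ((lines.drop (i+1)).headD "") ≠ "%%{init: {\"flowchart\": {\"htmlLabels\": false}} }%%")) := by
      rintro ⟨-, hor⟩
      rcases hor with hnil | hne
      · rw [List.drop_eq_nil_iff] at hnil; omega
      · rw [headD_drop] at hne; exact hne hcond.2
    rw [if_neg hc, List.take_succ_eq_append_getElem h]
    simp only [List.append_assoc, List.singleton_append, List.cons_append, List.nil_append, if_false]
  | case3 lines i h hfence ih =>
    rw [fix_mermaid_loop]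
    simp only [h, dif_pos]
    rw [if_neg hfence]
    rw [ih (by omega)]
    have hd : lines.drop i = lines[i] :: lines.drop (i+1) := List.drop_eq_getElem_cons h
    rw [hd, gSpec]
    rw [if_neg (by rintro ⟨hf, -⟩; exact hfence hf), List.take_succ_eq_append_getElem h]
    simp only [List.append_assoc, List.singleton_append, List.cons_append, List.nil_append, if_false]
  | case4 lines i h =>
    rw [fix_mermaid_loop]
    have heq : i = lines.length := by omega
    rw [dif_neg h]
    rw [List.take_of_length_le (by omega), List.drop_of_length_le (by omega)]
    simp [gSpec]

-- the comprehension's condition, named for the proofs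
def pb (l : List String) : Nat → Bool := fun i =>
  decide (l.getD i "" = "```{mermaid}" ∧
    (i + 1 = l.length ∨
      PySem.Str.strip (l.getD (i + 1) "") ≠ "%%{init: {\"flowchart\": {\"htmlLabels\": false}} }%%"))

lemma pb_succ (a : String) (rest : List String) (k : Nat) : pb (a :: rest) (k + 1) = pb rest k := by
  unfold pb
  apply decide_eq_decide.mpr
  constructor
  · rintro ⟨h1, h2⟩
    refine ⟨by simpa using h1, ?_⟩
    rcases h2 with h2 | h2
    · left; simp at h2; omega
    · right; simpa using h2
  · rintro ⟨h1, h2⟩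
    refine ⟨by simpa using h1, ?_⟩
    rcases h2 with h2 | h2
    · left; simp; omega
    · right; simpa using h2

lemma pb_zero_iff (a : String) (rest : List String) :
    pb (a :: rest) 0 = true ↔
      (a = "```{mermaid}" ∧
        (rest = [] ∨
          PySem.Str.strip (rest.headD "") ≠ "%%{init: {\"flowchart\": {\"htmlLabels\": false}} }%%")) := by
  unfold pb
  rw [decide_eq_true_iff]
  cases rest <;> simp

lemma fold_shift (a : String) (L : List String) (ks : List Nat)
    (hks : ∀ k ∈ ks, k < L.length) :
    (ks.map Nat.succ).foldl
      (fun acc (j : Nat) => PySem.List.insert acc ((j : Int) + 1)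
        "%%{init: {\"flowchart\": {\"htmlLabels\": false}} }%%\n") (a :: L)
    = a :: ks.foldl
      (fun acc (j : Nat) => PySem.List.insert acc ((j : Int) + 1)
        "%%{init: {\"flowchart\": {\"htmlLabels\": false}} }%%\n") L := by
  induction ks generalizing L with
  | nil => simp
  | cons k ks ih =>
    have hk : k < L.length := hks k (by simp)
    have hstep : PySem.List.insert (a :: L) ((Nat.succ k : Int) + 1)
        "%%{init: {\"flowchart\": {\"htmlLabels\": false}} }%%\n"
        = a :: PySem.List.insert L ((k : Int) + 1)
        "%%{init: {\"flowchart\": {\"htmlLabels\": false}} }%%\n" := by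
      have h1 := PySem.List.insert_natCast (a :: L) (k + 2)
        "%%{init: {\"flowchart\": {\"htmlLabels\": false}} }%%\n" (by simp; omega)
      have h2 := PySem.List.insert_natCast L (k + 1)
        "%%{init: {\"flowchart\": {\"htmlLabels\": false}} }%%\n" (by omega)
      push_cast at h1 h2 ⊢
      rw [show (k : Int) + 1 + 1 = (k : Int) + 2 by ring, h1, h2]
      simp [List.take_succ_cons, List.drop_succ_cons]
    simp only [List.map_cons, List.foldl_cons, hstep]
    exact ih _ (fun k' hk' => by
      rw [PySem.List.length_insert]
      exact Nat.lt_succ_of_lt (hks k' (by simp [hk'])))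

lemma alt_eq (lines : List String) : fix_mermaid_alt lines = gSpec lines := by
  induction lines with
  | nil => simp [fix_mermaid_alt, gSpec]
  | cons a rest ih =>
    have key : fix_mermaid_alt (a :: rest)
        = ((List.range (a :: rest).length).filter (pb (a :: rest))).reverse.foldl
            (fun acc (j : Nat) => PySem.List.insert acc ((j : Int) + 1)
              "%%{init: {\"flowchart\": {\"htmlLabels\": false}} }%%\n") (a :: rest) := rfl
    have hrest : ((List.range rest.length).filter (pb rest)).reverse.foldl
        (fun acc (j : Nat) => PySem.List.insert acc ((j : Int) + 1)
          "%%{init: {\"flowchart\": {\"htmlLabels\": false}} }%%\n") rest = gSpec rest := by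
      rw [← ih]; rfl
    have hcomp : (pb (a :: rest)) ∘ Nat.succ = pb rest := funext (fun k => pb_succ a rest k)
    have hmemT : ∀ k ∈ ((List.range rest.length).filter (pb rest)).reverse, k < rest.length := by
      intro k hk
      rw [List.mem_reverse, List.mem_filter] at hk
      exact List.mem_range.mp hk.1
    rw [key, show (a :: rest).length = rest.length + 1 from rfl,
        List.range_succ_eq_map, List.filter_cons, List.filter_map, hcomp]
    by_cases hp : pb (a :: rest) 0 = true
    · rw [if_pos hp, List.reverse_cons, List.foldl_append, ← List.map_reverse,
          fold_shift a rest _ hmemT, hrest]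
      simp only [List.foldl_cons, List.foldl_nil]
      have hins : PySem.List.insert (a :: gSpec rest) (((0 : Nat) : Int) + 1)
          "%%{init: {\"flowchart\": {\"htmlLabels\": false}} }%%\n"
          = a :: "%%{init: {\"flowchart\": {\"htmlLabels\": false}} }%%\n" :: gSpec rest := by
        have h1 := PySem.List.insert_natCast (a :: gSpec rest) 1
          "%%{init: {\"flowchart\": {\"htmlLabels\": false}} }%%\n" (by simp)
        push_cast at h1 ⊢
        simpa using h1
      rw [hins, gSpec, if_pos ((pb_zero_iff a rest).mp hp)]
    · rw [if_neg hp, ← List.map_reverse, fold_shift a rest _ hmemT, hrest]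
      rw [gSpec, if_neg (fun hc => hp ((pb_zero_iff a rest).mpr hc))]


-- ===== VERDICT (by name: the statement is the Claim_ definition above) =====
theorem fix_mermaid_spec : Claim_equal_fix_mermaid := by
  intro lines _
  unfold Spec_fix_mermaid
  rw [fix_mermaid, loop_eq lines 0 (by omega), alt_eq]
  simp
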